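-- pv_equiv track=rewrite | github.com/MassiPozzuto/IP | Python/Parcial/submission.py | obtener_subsecuencias_consecutivas
-- ===== SOURCE A (Python) =====
-- def obtener_subsecuencias_consecutivas(lista: list[int]) -> list[list[int]]:
-- 	res: list[list[int]] = []
--
-- 	for i in range(len(lista)):
-- 		subsecuencia_actual: list[int] = []
-- 		for j in range(i, len(lista)):
-- 			subsecuencia_actual.append(lista[j])
-- 			res.append(subsecuencia_actual.copy())
--
-- 	return res
-- ===== SOURCE B (Python) =====
-- def obtener_subsecuencias_consecutivas(lista: list[int]) -> list[list[int]]: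
-- 	return [lista[i:j] for i in range(len(lista)) for j in range(i + 1, len(lista) + 1)]
-- ===== Notes on version B (the rewrite author's own statement) =====
-- stated objective: simpler
-- what changed: Replaces the accumulator list that is grown, copied and appended element by element with a single comprehension that builds each subsequence fresh as a slice lista[i:j].
import Mathlib
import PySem

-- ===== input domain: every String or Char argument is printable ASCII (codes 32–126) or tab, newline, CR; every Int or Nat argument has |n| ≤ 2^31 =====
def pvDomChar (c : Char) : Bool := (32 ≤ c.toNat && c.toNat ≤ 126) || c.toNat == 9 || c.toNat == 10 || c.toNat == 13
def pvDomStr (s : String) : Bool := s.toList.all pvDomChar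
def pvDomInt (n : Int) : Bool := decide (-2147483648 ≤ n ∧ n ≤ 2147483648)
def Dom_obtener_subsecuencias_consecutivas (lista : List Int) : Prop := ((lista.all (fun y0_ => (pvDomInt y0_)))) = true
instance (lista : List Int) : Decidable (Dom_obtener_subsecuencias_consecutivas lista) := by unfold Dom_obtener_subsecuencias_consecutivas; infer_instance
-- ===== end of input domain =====

-- B replaces the grown-and-copied accumulator with a comprehension of fresh slices lista[i:j] (objective: simpler).
-- ===== PORT A =====
def obtener_subsecuencias_consecutivas (lista : List Int) : List (List Int) :=
  (PySem.List.pyRange 0 (lista.length : Int) 1).foldl (fun res i =>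
    ((PySem.List.pyRange i (lista.length : Int) 1).foldl
      (fun (st : List Int × List (List Int)) j =>
        (st.1 ++ [PySem.List.pyGetD lista j 0],
         st.2 ++ [st.1 ++ [PySem.List.pyGetD lista j 0]]))
      (([] : List Int), res)).2) []

-- ===== PORT B =====
def obtener_subsecuencias_consecutivas_alt (lista : List Int) : List (List Int) :=
  (PySem.List.pyRange 0 (lista.length : Int) 1).flatMap (fun i =>
    (PySem.List.pyRange (i + 1) ((lista.length : Int) + 1) 1).map (fun j =>
      PySem.List.slice lista (some i) (some j)))

-- ===== PRECONDITION & SPEC =====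
def Spec_obtener_subsecuencias_consecutivas (lista : List Int) (out : List (List Int)) : Prop := out = obtener_subsecuencias_consecutivas_alt lista
instance (lista : List Int) (out : List (List Int)) : Decidable (Spec_obtener_subsecuencias_consecutivas lista out) := by unfold Spec_obtener_subsecuencias_consecutivas; infer_instance

-- ===== CLAIM (what is proved, stated in full; the proofs are below) =====
def Claim_equal_obtener_subsecuencias_consecutivas : Prop := ∀ (lista : List Int), Dom_obtener_subsecuencias_consecutivas lista → Spec_obtener_subsecuencias_consecutivas lista (obtener_subsecuencias_consecutivas lista)

-- ===== LEMMAS AND PROOFS =====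

-- one block of results: the nonempty prefixes of xs, each prefixed by cur
lemma inner_fold_eq (xs : List Int) (cur : List Int) (res : List (List Int)) :
    (xs.foldl (fun (st : List Int × List (List Int)) x =>
        (st.1 ++ [x], st.2 ++ [st.1 ++ [x]])) (cur, res)).2
      = res ++ (List.range xs.length).map (fun k => cur ++ xs.take (k + 1)) := by
  induction xs generalizing cur res with
  | nil => simp
  | cons x xs ih =>
      simp only [List.foldl_cons, ih, List.length_cons, List.range_succ_eq_map,
        List.map_cons, List.map_map, List.take_succ_cons, List.take_zero]
      simp [Function.comp, List.append_assoc]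

lemma blockA_eq (lista : List Int) (m : Nat) (res : List (List Int)) :
    ((PySem.List.pyRange (m : Int) (lista.length : Int) 1).foldl
      (fun (st : List Int × List (List Int)) j =>
        (st.1 ++ [PySem.List.pyGetD lista j 0],
         st.2 ++ [st.1 ++ [PySem.List.pyGetD lista j 0]]))
      (([] : List Int), res)).2
    = res ++ (List.range (lista.length - m)).map
        (fun k => (lista.drop m).take (k + 1)) := by
  rw [PySem.List.foldl_pyRange_pyGetD' lista 0
      (fun st x => (st.1 ++ [x], st.2 ++ [st.1 ++ [x]])) (([], res)) (a := (m : Int)) (by positivity)]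
  rw [Int.toNat_natCast, inner_fold_eq, List.length_drop]
  simp

lemma blockB_eq (lista : List Int) (m : Nat) :
    (PySem.List.pyRange ((m : Int) + 1) ((lista.length : Int) + 1) 1).map
        (fun j => PySem.List.slice lista (some (m : Int)) (some j))
    = (List.range (lista.length - m)).map (fun k => (lista.drop m).take (k + 1)) := by
  rw [PySem.List.pyRange_one, List.map_map]
  have hlen : ((lista.length : Int) + 1 - ((m : Int) + 1)).toNat = lista.length - m := by
    omega
  rw [hlen]
  refine List.map_congr_left (fun k hk => ?_)
  show PySem.List.slice lista (some (m : Int)) (some ((m : Int) + 1 + (k : Int))) = _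
  have : (m : Int) + 1 + (k : Int) = (m : Int) + ((k + 1 : Nat) : Int) := by push_cast; ring
  rw [this, PySem.List.slice_natCast_add]

-- ===== VERDICT (by name: the statement is the Claim_ definition above) =====
theorem obtener_subsecuencias_consecutivas_spec : Claim_equal_obtener_subsecuencias_consecutivas := by
  intro lista _
  show obtener_subsecuencias_consecutivas lista = obtener_subsecuencias_consecutivas_alt lista
  unfold obtener_subsecuencias_consecutivas obtener_subsecuencias_consecutivas_alt
  rw [PySem.List.pyRange_zero_nat, List.foldl_map, List.flatMap_map]
  have hA : (fun (res : List (List Int)) (m : Nat) =>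
      ((PySem.List.pyRange (m : Int) (lista.length : Int) 1).foldl
        (fun (st : List Int × List (List Int)) j =>
          (st.1 ++ [PySem.List.pyGetD lista j 0],
           st.2 ++ [st.1 ++ [PySem.List.pyGetD lista j 0]]))
        (([] : List Int), res)).2)
      = fun res m => res ++ (List.range (lista.length - m)).map
          (fun k => (lista.drop m).take (k + 1)) :=
    funext fun res => funext fun m => blockA_eq lista m res
  rw [hA, PySem.List.foldl_append_eq_flatMap]
  simp only [List.nil_append, blockB_eq lista]
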